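-- pv_equiv track=rewrite | github.com/J4230066-CHOIHYUNSEOK/speech | chess_system/voice_recog/parser.py | parse_move
-- ===== SOURCE A (Python) =====
-- pieces = ["pawn", "knight", "bishop", "rook", "queen", "king"]
--
-- files = ["a", "b", "c", "d", "e", "f", "g", "h"]
--
-- ranks = ["one", "two", "three", "four", "five", "six", "seven", "eight"]
--
-- rank_word_to_digit = {
--     "one": "1",
--     "two": "2",
--     "three": "3",
--     "four": "4",
--     "five": "5",
--     "six": "6",
--     "seven": "7",
--     "eight": "8",
-- }
--
-- piece_to_san = {
--     "pawn": "",
--     "knight": "N",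
--     "bishop": "B",
--     "rook": "R",
--     "queen": "Q",
--     "king": "K",
-- }
--
-- def parse_move(words):
--     """
--     Return a normalized move string if words resemble a chess move.
--     Converts rank words to digits so downstream chess_system can consume
--     SAN-like (e.g., `Ne4`) or UCI-like (`e2e4`) text directly.
--     Tolerates filler words (e.g., "queen to a four" -> queen a four).
--     """
--     words = [w.lower() for w in words]
--
--     def first_after(start_idx, valid_set):
--         for i in range(start_idx, len(words)):
--             if words[i] in valid_set:
--                 return i, words[i]
--         return None, None
--
--     # piece → file → rank (with possible filler tokens in between)
--     i_piece, piece = first_after(0, pieces)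
--     if piece:
--         i_file, file = first_after(i_piece + 1, files)
--         if file:
--             i_rank, rank = first_after(i_file + 1, ranks)
--             if rank:
--                 square = _to_square(file, rank)
--                 if not square:
--                     return None
--                 prefix = piece_to_san.get(piece, "")
--                 return f"{prefix}{square}"
--
--     # file → rank → file → rank (with fillers)
--     i_f1, f1 = first_after(0, files)
--     if f1:
--         i_r1, r1 = first_after(i_f1 + 1, ranks)
--         if r1:
--             i_f2, f2 = first_after(i_r1 + 1, files)
--             if f2:
--                 i_r2, r2 = first_after(i_f2 + 1, ranks)
--                 if r2:
--                     from_sq = _to_square(f1, r1)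
--                     to_sq = _to_square(f2, r2)
--                     if from_sq and to_sq:
--                         return f"{from_sq}{to_sq}"
--
--     # single pawn destination: file → rank
--     i_file1, file1 = first_after(0, files)
--     if file1:
--         i_rank1, rank1 = first_after(i_file1 + 1, ranks)
--         if rank1:
--             square = _to_square(file1, rank1)
--             if square:
--                 return square
--
--     return None
--
-- def _to_square(file_word: str | None, rank_word: str | None) -> str | None:
--     if not file_word or not rank_word:
--         return None
--     if file_word not in files or rank_word not in ranks:
--         return None
--     digit = rank_word_to_digit.get(rank_word)
--     if not digit:
--         return None
--     return f"{file_word}{digit}"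
-- ===== SOURCE B (Python) =====
-- # B: one-pass tokenizer into typed tokens, then sequential pattern matching -- simpler, no index bookkeeping.
-- PIECE_SAN = {"pawn": "", "knight": "N", "bishop": "B", "rook": "R", "queen": "Q", "king": "K"}
-- FILES = ["a", "b", "c", "d", "e", "f", "g", "h"]
-- RANK_DIGIT = {"one": "1", "two": "2", "three": "3", "four": "4",
--               "five": "5", "six": "6", "seven": "7", "eight": "8"}
--
--
-- def _take(kind, toks):
--     """First token of the given kind; returns (value, tokens after it) or (None, [])."""
--     for i, t in enumerate(toks):
--         if t[0] == kind:
--             return t[1], toks[i + 1:]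
--     return None, []
--
--
-- def parse_move(words):
--     toks = []
--     for w in words:
--         w = w.lower()
--         if w in PIECE_SAN:
--             toks.append(("p", PIECE_SAN[w]))
--         elif w in FILES:
--             toks.append(("f", w))
--         elif w in RANK_DIGIT:
--             toks.append(("r", RANK_DIGIT[w]))
--
--     # piece -> file -> rank  : SAN-like
--     p, rest = _take("p", toks)
--     if p is not None:
--         f, rest2 = _take("f", rest)
--         if f is not None:
--             r, _ = _take("r", rest2)
--             if r is not None:
--                 return p + f + r
--
--     # file -> rank (-> file -> rank) : UCI-like, else bare square
--     f1, rest = _take("f", toks)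
--     if f1 is not None:
--         r1, rest = _take("r", rest)
--         if r1 is not None:
--             f2, rest2 = _take("f", rest)
--             if f2 is not None:
--                 r2, _ = _take("r", rest2)
--                 if r2 is not None:
--                     return f1 + r1 + f2 + r2
--             return f1 + r1
--     return None
-- ===== Notes on version B (the rewrite author's own statement) =====
-- stated objective: simpler
-- what changed: A repeatedly rescans the word list with an indexed first_after(start_idx, vocab) helper and recomputes the file/rank searches for each fall-through branch; B lowercases and classifies the words once into a typed token list (piece/file/rank with output values precomputed) and then matches the three move shapes sequentially on that token list, so the index bookkeeping and the repeated rescans of filler words disappear.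
import Mathlib
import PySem

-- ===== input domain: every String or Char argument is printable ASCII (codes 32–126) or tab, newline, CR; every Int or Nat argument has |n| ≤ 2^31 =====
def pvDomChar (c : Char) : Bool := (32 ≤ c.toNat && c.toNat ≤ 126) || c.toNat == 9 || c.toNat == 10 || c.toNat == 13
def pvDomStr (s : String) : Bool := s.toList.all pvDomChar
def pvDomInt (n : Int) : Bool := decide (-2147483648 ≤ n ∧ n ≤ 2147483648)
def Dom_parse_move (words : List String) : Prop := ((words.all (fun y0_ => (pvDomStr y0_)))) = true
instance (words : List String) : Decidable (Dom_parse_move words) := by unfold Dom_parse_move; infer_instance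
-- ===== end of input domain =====

-- B tokenizes the words once into typed tokens and then matches the token sequence, so the
-- repeated indexed "first word after i in vocabulary" scans disappear (objective: simpler).

-- ===== PORT A =====
def piecesA : List String := ["pawn", "knight", "bishop", "rook", "queen", "king"]
def filesA : List String := ["a", "b", "c", "d", "e", "f", "g", "h"]
def ranksA : List String := ["one", "two", "three", "four", "five", "six", "seven", "eight"]
def rankWordToDigit : PySem.Dict String String :=
  PySem.Dict.ofList [("one", "1"), ("two", "2"), ("three", "3"), ("four", "4"),
                     ("five", "5"), ("six", "6"), ("seven", "7"), ("eight", "8")]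
def pieceToSan : PySem.Dict String String :=
  PySem.Dict.ofList [("pawn", ""), ("knight", "N"), ("bishop", "B"), ("rook", "R"),
                     ("queen", "Q"), ("king", "K")]

-- _to_square: the Optional-argument None checks are ported at the actual (string) call sites as
-- emptiness checks; `if not digit` is exactly the `none` case here (no stored digit is empty).
def toSquareA (fileWord rankWord : String) : Option String :=
  if fileWord = "" ∨ rankWord = "" then none
  else if ¬ (filesA.contains fileWord) ∨ ¬ (ranksA.contains rankWord) then none
  else match PySem.Dict.get? rankWordToDigit rankWord with
       | none => none
       | some digit => some (fileWord ++ digit)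

-- the `for i in range(start_idx, len(words))` loop of first_after; i is always in range,
-- so words[i] is PySem.List.pyGetD ws i "" (exact here).
def faGo (ws valid : List String) : List Int → Option Int × Option String
  | [] => (none, none)
  | i :: rest =>
      let w := PySem.List.pyGetD ws i ""
      if valid.contains w then (some i, some w) else faGo ws valid rest

def firstAfterA (ws : List String) (start : Int) (valid : List String) :
    Option Int × Option String :=
  faGo ws valid (PySem.List.pyRange start (PySem.List.len ws) 1)

-- `if piece:` etc.: a found word is a member of the (nonempty-word) vocabulary, so Python's
-- truthiness test is exactly the some/none distinction. The three sequential fall-through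
-- blocks of A are the helpers branch1 / branch23A / branch3A, in the same order.
-- single pawn destination: file → rank
def branch3A (ws : List String) : Option String :=
  match firstAfterA ws 0 filesA with
  | (some i_file1, some file1) =>
      match firstAfterA ws (i_file1 + 1) ranksA with
      | (_, some rank1) =>
          match toSquareA file1 rank1 with
          | some square => some square
          | none => none
      | _ => none
  | _ => none

-- file → rank → file → rank (with fillers); falls through to branch3A
def branch23A (ws : List String) : Option String :=
  match firstAfterA ws 0 filesA with
  | (some i_f1, some f1) =>
      match firstAfterA ws (i_f1 + 1) ranksA with
      | (some i_r1, some r1) =>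
          match firstAfterA ws (i_r1 + 1) filesA with
          | (some i_f2, some f2) =>
              match firstAfterA ws (i_f2 + 1) ranksA with
              | (_, some r2) =>
                  match toSquareA f1 r1, toSquareA f2 r2 with
                  | some from_sq, some to_sq => some (from_sq ++ to_sq)
                  | _, _ => branch3A ws
              | _ => branch3A ws
          | _ => branch3A ws
      | _ => branch3A ws
  | _ => branch3A ws

-- piece → file → rank (with possible filler tokens in between); falls through to branch23A
def parse_move (words : List String) : Option String :=
  let ws := words.map PySem.Str.lower
  match firstAfterA ws 0 piecesA with
  | (some i_piece, some piece) =>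
      match firstAfterA ws (i_piece + 1) filesA with
      | (some i_file, some file) =>
          match firstAfterA ws (i_file + 1) ranksA with
          | (_, some rank) =>
              match toSquareA file rank with
              | none => none
              | some square => some (PySem.Dict.getD pieceToSan piece "" ++ square)
          | _ => branch23A ws
      | _ => branch23A ws
  | _ => branch23A ws

-- ===== PORT B =====
-- token kinds: 0 = piece (value: SAN prefix), 1 = file (value: letter), 2 = rank (value: digit)
def classify0 (w : String) : Option (Nat × String) :=
  match PySem.Dict.get? pieceToSan w with
  | some s => some (0, s)
  | none =>
      if filesA.contains w then some (1, w)
      else match PySem.Dict.get? rankWordToDigit w with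
           | some d => some (2, d)
           | none => none

def classifyB (w : String) : Option (Nat × String) := classify0 (PySem.Str.lower w)

def takeB (kind : Nat) : List (Nat × String) → Option String × List (Nat × String)
  | [] => (none, [])
  | t :: ts => if t.1 = kind then (some t.2, ts) else takeB kind ts

-- file → rank (→ file → rank): UCI-like, else bare square
def branch23B (toks : List (Nat × String)) : Option String :=
  match takeB 1 toks with
  | (some f1, rest) =>
      match takeB 2 rest with
      | (some r1, rest') =>
          (match takeB 1 rest' with
           | (some f2, rest2) =>
               match (takeB 2 rest2).1 with
               | some r2 => some (f1 ++ r1 ++ f2 ++ r2)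
               | none => some (f1 ++ r1)
           | (none, _) => some (f1 ++ r1))
      | (none, _) => none
  | (none, _) => none

def parse_move_alt (words : List String) : Option String :=
  let toks := words.filterMap classifyB
  -- piece → file → rank: SAN-like
  match takeB 0 toks with
  | (some p, rest) =>
      match takeB 1 rest with
      | (some f, rest2) =>
          (match (takeB 2 rest2).1 with
           | some r => some (p ++ f ++ r)
           | none => branch23B toks)
      | (none, _) => branch23B toks
  | (none, _) => branch23B toks

-- ===== PRECONDITION & SPEC =====
def Spec_parse_move (words : List String) (out : Option String) : Prop := out = parse_move_alt words
instance (words : List String) (out : Option String) : Decidable (Spec_parse_move words out) := by unfold Spec_parse_move; infer_instance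

-- ===== CLAIM (what is proved, stated in full; the proofs are below) =====
def Claim_equal_parse_move : Prop := ∀ (words : List String), Dom_parse_move words → Spec_parse_move words (parse_move words)

-- ===== LEMMAS AND PROOFS =====

-- proof-only helper: structural "first word in vocab with its offset" on a suffix
def ffw (valid : List String) : List String → Option (Nat × String)
  | [] => none
  | w :: t => if valid.contains w then some (0, w) else (ffw valid t).map (fun p => (p.1 + 1, p.2))

theorem fa_struct (ws valid : List String) (s : Nat) :
    firstAfterA ws (s : Int) valid =
      (match ffw valid (ws.drop s) with
       | none => (none, none)
       | some (k, w) => (some ((s + k : Nat) : Int), some w)) := by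
  generalize hn : ws.length - s = n
  induction n generalizing s with
  | zero =>
      have hs : ws.length ≤ s := by omega
      have h1 : ws.drop s = [] := List.drop_eq_nil_of_le hs
      rw [h1]
      unfold firstAfterA
      rw [PySem.List.len_eq, PySem.List.pyRange_one_eq_nil (by exact_mod_cast hs)]
      rfl
  | succ n ih =>
      have hs : s < ws.length := by omega
      have hcons : ws.drop s = ws[s] :: ws.drop (s + 1) := List.drop_eq_getElem_cons hs
      unfold firstAfterA
      rw [PySem.List.len_eq, PySem.List.pyRange_one_cons (by exact_mod_cast hs)]
      show (if valid.contains (PySem.List.pyGetD ws (s : Int) "") then _ else faGo ws valid _) = _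
      have hget : PySem.List.pyGetD ws (s : Int) "" = ws[s] := by
        rw [PySem.List.pyGetD_natCast]
        exact List.getD_eq_getElem _ _ hs
      rw [hget, hcons]
      by_cases hc : ws[s] ∈ valid
      · simp [ffw, hc]
      · have hcc : valid.contains ws[s] = false := by simpa using hc
        have ih' := ih (s + 1) (by omega)
        unfold firstAfterA at ih'
        rw [PySem.List.len_eq] at ih'
        have : ((s : Int) + 1) = ((s + 1 : Nat) : Int) := by push_cast; ring
        rw [this, ih']
        simp only [ffw, hcc, Bool.false_eq_true, if_false]
        rcases hff : ffw valid (ws.drop (s + 1)) with _ | ⟨k, w⟩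
        · simp
        · simp only [Option.map_some]
          congr 2
          push_cast
          ring

theorem take_of_ffw_none (vocab : List String) (kind : Nat)
    (H2 : ∀ w v, classify0 w = some (kind, v) → w ∈ vocab) :
    ∀ l : List String, ffw vocab l = none →
      takeB kind (l.filterMap classify0) = (none, []) := by
  intro l
  induction l with
  | nil => intro _; rfl
  | cons x t ih =>
      intro h
      simp only [ffw] at h
      cases hc : vocab.contains x with
      | true => rw [if_pos hc] at h; exact absurd h (by simp)
      | false =>
        rw [if_neg (by rw [hc]; decide)] at h
        rw [Option.map_eq_none_iff] at h
        have hcm : x ∉ vocab := by simpa using hc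
        rcases hcx : classify0 x with _ | ⟨k1, v1⟩
        · simp only [List.filterMap_cons, hcx]
          exact ih h
        · have hne : k1 ≠ kind := fun hk => hcm (H2 x v1 (hk ▸ hcx))
          simp only [List.filterMap_cons, hcx]
          simp only [takeB, hne, if_false]
          exact ih h

theorem take_of_ffw_some (vocab : List String) (kind : Nat) (val : String → String)
    (H1 : ∀ w ∈ vocab, classify0 w = some (kind, val w))
    (H2 : ∀ w v, classify0 w = some (kind, v) → w ∈ vocab) :
    ∀ (l : List String) (k : Nat) (w : String), ffw vocab l = some (k, w) →
      w ∈ vocab ∧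
      takeB kind (l.filterMap classify0) =
        (some (val w), (l.drop (k + 1)).filterMap classify0) := by
  intro l
  induction l with
  | nil => intro k w h; simp [ffw] at h
  | cons x t ih =>
      intro k w h
      simp only [ffw] at h
      cases hc : vocab.contains x with
      | true =>
        rw [if_pos hc] at h
        have hmem : x ∈ vocab := by simpa using hc
        simp only [Option.some.injEq, Prod.mk.injEq] at h
        obtain ⟨hk, hw⟩ := h
        subst hk; subst hw
        refine ⟨hmem, ?_⟩
        simp [H1 x hmem, takeB]
      | false =>
        rw [if_neg (by rw [hc]; decide)] at h
        rw [Option.map_eq_some_iff] at h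
        obtain ⟨⟨k', w'⟩, hff, heq⟩ := h
        simp only [Prod.mk.injEq] at heq
        obtain ⟨hk, hw⟩ := heq
        subst hk; subst hw
        have hcm : x ∉ vocab := by simpa using hc
        obtain ⟨hm, ht⟩ := ih k' w' hff
        refine ⟨hm, ?_⟩
        rcases hcx : classify0 x with _ | ⟨k1, v1⟩
        · simp only [List.filterMap_cons, hcx]
          simpa using ht
        · have hne : k1 ≠ kind := fun hk => hcm (H2 x v1 (hk ▸ hcx))
          simp only [List.filterMap_cons, hcx]
          simp only [takeB, hne, if_false]
          simpa using ht

theorem classify0_of_piece (w : String) (h : w ∈ piecesA) :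
    classify0 w = some (0, PySem.Dict.getD pieceToSan w "") := by
  fin_cases h <;> rfl

theorem classify0_of_file (w : String) (h : w ∈ filesA) :
    classify0 w = some (1, w) := by
  fin_cases h <;> rfl

theorem classify0_of_rank (w : String) (h : w ∈ ranksA) :
    classify0 w = some (2, PySem.Dict.getD rankWordToDigit w "") := by
  fin_cases h <;> rfl

theorem classify0_inv0 (w v : String) (h : classify0 w = some (0, v)) : w ∈ piecesA := by
  unfold classify0 at h
  rcases hp : PySem.Dict.get? pieceToSan w with _ | s <;> rw [hp] at h
  · split_ifs at h with hf
    · simp at h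
    · rcases hr : PySem.Dict.get? rankWordToDigit w with _ | d <;> rw [hr] at h <;> simp at h
  · have hk : w ∈ pieceToSan.keys := by
      by_contra hk
      rw [← PySem.Dict.get?_eq_none_iff_not_mem_keys] at hk
      simp [hk] at hp
    simpa using hk

theorem classify0_inv1 (w v : String) (h : classify0 w = some (1, v)) : w ∈ filesA := by
  unfold classify0 at h
  rcases hp : PySem.Dict.get? pieceToSan w with _ | s <;> rw [hp] at h
  · split_ifs at h with hf
    · simpa using hf
    · rcases hr : PySem.Dict.get? rankWordToDigit w with _ | d <;> rw [hr] at h <;> simp at h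
  · simp at h

theorem classify0_inv2 (w v : String) (h : classify0 w = some (2, v)) : w ∈ ranksA := by
  unfold classify0 at h
  rcases hp : PySem.Dict.get? pieceToSan w with _ | s <;> rw [hp] at h
  · split_ifs at h with hf
    · simp at h
    · rcases hr : PySem.Dict.get? rankWordToDigit w with _ | d <;> rw [hr] at h
      · simp at h
      · have hk : w ∈ rankWordToDigit.keys := by
          by_contra hk
          rw [← PySem.Dict.get?_eq_none_iff_not_mem_keys] at hk
          simp [hk] at hr
        simpa using hk
  · simp at h

theorem toSquareA_mem (fw rw : String) (hf : fw ∈ filesA) (hr : rw ∈ ranksA) :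
    toSquareA fw rw = some (fw ++ PySem.Dict.getD rankWordToDigit rw "") := by
  fin_cases hf <;> fin_cases hr <;> rfl

theorem branch23_eq (ws : List String) :
    branch23A ws = branch23B (ws.filterMap classify0) := by
  have t1n := take_of_ffw_none filesA 1 classify0_inv1
  have t1s := take_of_ffw_some filesA 1 (fun w => w) (fun w hw => classify0_of_file w hw) classify0_inv1
  have t2n := take_of_ffw_none ranksA 2 classify0_inv2
  have t2s := take_of_ffw_some ranksA 2 (fun w => PySem.Dict.getD rankWordToDigit w "") (fun w hw => classify0_of_rank w hw) classify0_inv2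
  unfold branch23A branch3A branch23B
  rcases h1 : ffw filesA ws with _ | ⟨k1, f1⟩
  · have hA1 : firstAfterA ws 0 filesA = (none, none) := by
      have h := fa_struct ws filesA 0; simpa [h1] using h
    have hB1 : takeB 1 (ws.filterMap classify0) = (none, []) := t1n ws h1
    simp only [hA1, hB1]
  · obtain ⟨hm1, hB1⟩ := t1s ws k1 f1 h1
    have hA1 : firstAfterA ws 0 filesA = (some ((k1 : Nat) : Int), some f1) := by
      have h := fa_struct ws filesA 0; simpa [h1] using h
    simp only [hA1, hB1]
    rcases h2 : ffw ranksA (ws.drop (k1 + 1)) with _ | ⟨k2, r1⟩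
    · have hA2 : firstAfterA ws ((k1 : Int) + 1) ranksA = (none, none) := by
        have h := fa_struct ws ranksA (k1 + 1)
        rw [h2] at h; simpa using h
      have hB2 : takeB 2 ((ws.drop (k1 + 1)).filterMap classify0) = (none, []) := t2n _ h2
      simp only [hA2, hB2]
    · obtain ⟨hm2, hB2⟩ := t2s _ k2 r1 h2
      have hA2 : firstAfterA ws ((k1 : Int) + 1) ranksA = (some ((k1 + 1 + k2 : Nat) : Int), some r1) := by
        have h := fa_struct ws ranksA (k1 + 1)
        rw [h2] at h; simpa using h
      simp only [hA2, hB2]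
      have hsq1 := toSquareA_mem f1 r1 hm1 hm2
      have hdr : (ws.drop (k1 + 1)).drop (k2 + 1) = ws.drop (k1 + 1 + k2 + 1) := by
        rw [List.drop_drop]; congr 1
      rcases h3 : ffw filesA (ws.drop (k1 + 1 + k2 + 1)) with _ | ⟨k3, f2⟩
      · have hA3 : firstAfterA ws (((k1 + 1 + k2 : Nat) : Int) + 1) filesA = (none, none) := by
          have h := fa_struct ws filesA (k1 + 1 + k2 + 1)
          rw [h3] at h; simpa using h
        have hB3 : takeB 1 (((ws.drop (k1 + 1)).drop (k2 + 1)).filterMap classify0) = (none, []) := by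
          rw [hdr]; exact t1n _ h3
        simp only [hA3, hB3, hsq1]
      · obtain ⟨hm3, hB3'⟩ := t1s _ k3 f2 h3
        have hA3 : firstAfterA ws (((k1 + 1 + k2 : Nat) : Int) + 1) filesA = (some ((k1 + 1 + k2 + 1 + k3 : Nat) : Int), some f2) := by
          have h := fa_struct ws filesA (k1 + 1 + k2 + 1)
          rw [h3] at h; simpa using h
        have hB3 : takeB 1 (((ws.drop (k1 + 1)).drop (k2 + 1)).filterMap classify0) = (some f2, ((ws.drop (k1 + 1 + k2 + 1)).drop (k3 + 1)).filterMap classify0) := by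
          rw [hdr]
          have h := hB3'
          rw [List.drop_drop] at h ⊢
          convert h using 4
        simp only [hA3, hB3]
        rcases h4 : ffw ranksA (ws.drop (k1 + 1 + k2 + 1 + k3 + 1)) with _ | ⟨k4, r2⟩
        · have hA4 : firstAfterA ws (((k1 + 1 + k2 + 1 + k3 : Nat) : Int) + 1) ranksA = (none, none) := by
            have h := fa_struct ws ranksA (k1 + 1 + k2 + 1 + k3 + 1)
            rw [h4] at h; simpa using h
          have hdr2 : (ws.drop (k1 + 1 + k2 + 1)).drop (k3 + 1) = ws.drop (k1 + 1 + k2 + 1 + k3 + 1) := by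
            rw [List.drop_drop]; congr 1
          have hB4 : takeB 2 (((ws.drop (k1 + 1 + k2 + 1)).drop (k3 + 1)).filterMap classify0) = (none, []) := by
            rw [hdr2]; exact t2n _ h4
          simp only [hA4, hB4, hsq1]
        · obtain ⟨hm4, hB4'⟩ := t2s _ k4 r2 h4
          have hA4 : firstAfterA ws (((k1 + 1 + k2 + 1 + k3 : Nat) : Int) + 1) ranksA = (some ((k1 + 1 + k2 + 1 + k3 + 1 + k4 : Nat) : Int), some r2) := by
            have h := fa_struct ws ranksA (k1 + 1 + k2 + 1 + k3 + 1)
            rw [h4] at h; simpa using h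
          have hdr2 : (ws.drop (k1 + 1 + k2 + 1)).drop (k3 + 1) = ws.drop (k1 + 1 + k2 + 1 + k3 + 1) := by
            rw [List.drop_drop]; congr 1
          have hB4 : takeB 2 (((ws.drop (k1 + 1 + k2 + 1)).drop (k3 + 1)).filterMap classify0) = (some (PySem.Dict.getD rankWordToDigit r2 ""), ((ws.drop (k1 + 1 + k2 + 1 + k3 + 1)).drop (k4 + 1)).filterMap classify0) := by
            rw [hdr2]; exact hB4'
          simp only [hA4, hB4, hsq1, toSquareA_mem f2 r2 hm3 hm4]
          simp [String.append_assoc]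

theorem parse_move_eq (words : List String) : parse_move words = parse_move_alt words := by
  have t0n := take_of_ffw_none piecesA 0 classify0_inv0
  have t0s := take_of_ffw_some piecesA 0 (fun w => PySem.Dict.getD pieceToSan w "") (fun w hw => classify0_of_piece w hw) classify0_inv0
  have t1n := take_of_ffw_none filesA 1 classify0_inv1
  have t1s := take_of_ffw_some filesA 1 (fun w => w) (fun w hw => classify0_of_file w hw) classify0_inv1
  have t2s := take_of_ffw_some ranksA 2 (fun w => PySem.Dict.getD rankWordToDigit w "") (fun w hw => classify0_of_rank w hw) classify0_inv2
  have htoks : words.filterMap classifyB = (words.map PySem.Str.lower).filterMap classify0 := by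
    rw [List.filterMap_map]; rfl
  simp only [parse_move, parse_move_alt]
  rw [htoks]
  set ws := words.map PySem.Str.lower with hws
  rcases h1 : ffw piecesA ws with _ | ⟨k1, p1⟩
  · have hA1 : firstAfterA ws 0 piecesA = (none, none) := by
      have h := fa_struct ws piecesA 0; simpa [h1] using h
    have hB1 : takeB 0 (ws.filterMap classify0) = (none, []) := t0n ws h1
    simp only [hA1, hB1]
    exact branch23_eq ws
  · obtain ⟨hm1, hB1⟩ := t0s ws k1 p1 h1
    have hA1 : firstAfterA ws 0 piecesA = (some ((k1 : Nat) : Int), some p1) := by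
      have h := fa_struct ws piecesA 0; simpa [h1] using h
    simp only [hA1, hB1]
    rcases h2 : ffw filesA (ws.drop (k1 + 1)) with _ | ⟨k2, f1⟩
    · have hA2 : firstAfterA ws ((k1 : Int) + 1) filesA = (none, none) := by
        have h := fa_struct ws filesA (k1 + 1)
        rw [h2] at h; simpa using h
      have hB2 : takeB 1 ((ws.drop (k1 + 1)).filterMap classify0) = (none, []) := t1n _ h2
      simp only [hA2, hB2]
      exact branch23_eq ws
    · obtain ⟨hm2, hB2⟩ := t1s _ k2 f1 h2
      have hA2 : firstAfterA ws ((k1 : Int) + 1) filesA = (some ((k1 + 1 + k2 : Nat) : Int), some f1) := by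
        have h := fa_struct ws filesA (k1 + 1)
        rw [h2] at h; simpa using h
      simp only [hA2, hB2]
      have hdr : (ws.drop (k1 + 1)).drop (k2 + 1) = ws.drop (k1 + 1 + k2 + 1) := by
        rw [List.drop_drop]; congr 1
      rcases h3 : ffw ranksA (ws.drop (k1 + 1 + k2 + 1)) with _ | ⟨k3, r1⟩
      · have hA3 : firstAfterA ws (((k1 + 1 + k2 : Nat) : Int) + 1) ranksA = (none, none) := by
          have h := fa_struct ws ranksA (k1 + 1 + k2 + 1)
          rw [h3] at h; simpa using h
        have hB3 : (takeB 2 (((ws.drop (k1 + 1)).drop (k2 + 1)).filterMap classify0)).1 = none := by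
          rw [hdr, take_of_ffw_none ranksA 2 classify0_inv2 _ h3]
        simp only [hA3, hB3]
        exact branch23_eq ws
      · obtain ⟨hm3, hB3'⟩ := t2s _ k3 r1 h3
        have hA3 : firstAfterA ws (((k1 + 1 + k2 : Nat) : Int) + 1) ranksA = (some ((k1 + 1 + k2 + 1 + k3 : Nat) : Int), some r1) := by
          have h := fa_struct ws ranksA (k1 + 1 + k2 + 1)
          rw [h3] at h; simpa using h
        have hB3 : takeB 2 (((ws.drop (k1 + 1)).drop (k2 + 1)).filterMap classify0) = (some (PySem.Dict.getD rankWordToDigit r1 ""), ((ws.drop (k1 + 1 + k2 + 1)).drop (k3 + 1)).filterMap classify0) := by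
          rw [hdr]; exact hB3'
        simp only [hA3, hB3, toSquareA_mem f1 r1 hm2 hm3]
        simp [String.append_assoc]

-- ===== VERDICT (by name: the statement is the Claim_ definition above) =====
theorem parse_move_spec : Claim_equal_parse_move := by
  intro words _
  exact parse_move_eq words
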